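-- pv_equiv track=rewrite | github.com/Hana-Dul-Set/background-clustering | preprocess_data.py | get_elements_list_by_label
-- ===== SOURCE A (Python) =====
-- def get_elements_list_by_label(label_list, name_list, label_cnt):
--     data_by_label_list = []
--     for i in range(label_cnt):
--         one_label_list = []
--         for j in range(len(label_list)):
--             if(label_list[j] == i):
--                 one_label_list.append(name_list[j])
--         data_by_label_list.append(one_label_list)
--     return data_by_label_list
-- ===== SOURCE B (Python) =====
-- def get_elements_list_by_label(label_list, name_list, label_cnt):
--     data_by_label_list = [[] for _ in range(label_cnt)]
--     for j, lbl in enumerate(label_list):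
--         if 0 <= lbl < label_cnt:
--             data_by_label_list[lbl].append(name_list[j])
--     return data_by_label_list
-- ===== Notes on version B (the rewrite author's own statement) =====
-- stated objective: faster
-- what changed: Replaces A's outer loop over every label value with an inner rescan of label_list by one single pass over label_list that buckets each name directly via indexing into a pre-created list of label_cnt empty lists (guarded so out-of-range labels are dropped, as A drops them).
import Mathlib
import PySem

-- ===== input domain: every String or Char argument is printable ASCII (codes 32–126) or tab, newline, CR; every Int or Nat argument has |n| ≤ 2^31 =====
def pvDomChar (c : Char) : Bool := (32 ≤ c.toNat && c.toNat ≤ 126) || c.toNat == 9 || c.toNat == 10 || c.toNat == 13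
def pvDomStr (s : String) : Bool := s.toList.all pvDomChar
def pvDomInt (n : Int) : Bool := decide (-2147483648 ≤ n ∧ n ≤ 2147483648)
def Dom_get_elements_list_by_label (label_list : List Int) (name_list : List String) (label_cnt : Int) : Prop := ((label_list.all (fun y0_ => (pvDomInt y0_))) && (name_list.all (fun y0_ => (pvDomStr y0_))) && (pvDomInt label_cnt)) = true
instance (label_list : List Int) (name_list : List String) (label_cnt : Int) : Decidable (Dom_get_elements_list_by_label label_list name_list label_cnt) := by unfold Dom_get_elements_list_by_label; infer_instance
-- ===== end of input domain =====

-- B buckets each name in one pass over label_list instead of A's rescan of label_list per label value.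

-- ===== PORT A =====
def get_elements_list_by_label (label_list : List Int) (name_list : List String) (label_cnt : Int) : List (List String) :=
  (PySem.List.pyRange 0 label_cnt 1).foldl (fun data_by_label_list i =>
    data_by_label_list ++
      [(PySem.List.pyRange 0 (label_list.length : Int) 1).foldl (fun one_label_list j =>
        if PySem.List.pyGetD label_list j 0 = i then
          one_label_list ++ [PySem.List.pyGetD name_list j ""]
        else one_label_list) []]) []

-- ===== PORT B =====
def get_elements_list_by_label_alt (label_list : List Int) (name_list : List String) (label_cnt : Int) : List (List String) :=
  (PySem.List.enumerate label_list 0).foldl (fun bs p =>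
    if 0 ≤ p.2 ∧ p.2 < label_cnt then
      PySem.List.pySetD bs p.2 (PySem.List.pyGetD bs p.2 [] ++ [PySem.List.pyGetD name_list p.1 ""])
    else bs) ((PySem.List.pyRange 0 label_cnt 1).map (fun _ => ([] : List String)))

-- ===== PRECONDITION & SPEC =====
-- Pre_ excludes exactly the inputs on which the Python A raises IndexError: some position j whose
-- label lies in [0, label_cnt) while j is past the end of name_list (B raises there too).
def Pre_get_elements_list_by_label (label_list : List Int) (name_list : List String) (label_cnt : Int) : Prop :=
  ∀ j : Nat, (h : j < label_list.length) → 0 ≤ label_list[j] → label_list[j] < label_cnt → j < name_list.length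
instance (label_list : List Int) (name_list : List String) (label_cnt : Int) : Decidable (Pre_get_elements_list_by_label label_list name_list label_cnt) := by unfold Pre_get_elements_list_by_label; infer_instance

def pvWitness_get_elements_list_by_label : List Int × List String × Int := ([0, 2, -1, 1], ["a", "b", "c", "d"], 2)

def Spec_get_elements_list_by_label (label_list : List Int) (name_list : List String) (label_cnt : Int) (out : List (List String)) : Prop := out = get_elements_list_by_label_alt label_list name_list label_cnt
instance (label_list : List Int) (name_list : List String) (label_cnt : Int) (out : List (List String)) : Decidable (Spec_get_elements_list_by_label label_list name_list label_cnt out) := by unfold Spec_get_elements_list_by_label; infer_instance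

-- ===== CLAIM (what is proved, stated in full; the proofs are below) =====
def Claim_equal_get_elements_list_by_label : Prop := ∀ (label_list : List Int) (name_list : List String) (label_cnt : Int), Dom_get_elements_list_by_label label_list name_list label_cnt → Pre_get_elements_list_by_label label_list name_list label_cnt → Spec_get_elements_list_by_label label_list name_list label_cnt (get_elements_list_by_label label_list name_list label_cnt)

-- ===== LEMMAS AND PROOFS =====

-- the names collected (in j-order) into the bucket of label value i
def pvColl (name_list : List String) (label_cnt : Int) (E : List (Int × Int)) (i : Int) : List String :=
  match E with
  | [] => []
  | p :: E =>
    if 0 ≤ p.2 ∧ p.2 < label_cnt ∧ p.2 = i then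
      PySem.List.pyGetD name_list p.1 "" :: pvColl name_list label_cnt E i
    else pvColl name_list label_cnt E i

-- A's inner loop (phrased over the enumerate pairs) computes pvColl, for in-range i
lemma pvInnerA (name_list : List String) (label_cnt : Int) (i : Int) (hi0 : 0 ≤ i) (hic : i < label_cnt) :
    ∀ (E : List (Int × Int)) (acc : List String),
      E.foldl (fun one p => if p.2 = i then one ++ [PySem.List.pyGetD name_list p.1 ""] else one) acc
        = acc ++ pvColl name_list label_cnt E i := by
  intro E
  induction E with
  | nil => intro acc; simp [pvColl]
  | cons p E ih =>
    intro acc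
    by_cases h : p.2 = i
    · rw [List.foldl_cons, if_pos h, ih]
      have : pvColl name_list label_cnt (p :: E) i
          = PySem.List.pyGetD name_list p.1 "" :: pvColl name_list label_cnt E i := by
        simp [pvColl, h, hi0, hic]
      rw [this]; simp
    · rw [List.foldl_cons, if_neg h, ih]
      have : pvColl name_list label_cnt (p :: E) i = pvColl name_list label_cnt E i := by
        simp only [pvColl, if_neg (by tauto : ¬ (0 ≤ p.2 ∧ p.2 < label_cnt ∧ p.2 = i))]
      rw [this]

-- B's fold characterized bucket by bucket
lemma pvFoldB (name_list : List String) (label_cnt : Int) :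
    ∀ (E : List (Int × Int)) (bs : List (List String)),
      E.foldl (fun bs p =>
          if 0 ≤ p.2 ∧ p.2 < label_cnt then
            PySem.List.pySetD bs p.2 (PySem.List.pyGetD bs p.2 [] ++ [PySem.List.pyGetD name_list p.1 ""])
          else bs) bs
        = (List.range bs.length).map (fun k => bs.getD k [] ++ pvColl name_list label_cnt E (k : Int)) := by
  intro E
  induction E with
  | nil =>
    intro bs
    simp only [List.foldl_nil, pvColl, List.append_nil]
    refine List.ext_getElem (by simp) ?_
    intro k h1 h2
    simp [List.getD_eq_getElem?_getD, h1]
  | cons p E ih =>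
    intro bs
    rw [List.foldl_cons]
    by_cases h : 0 ≤ p.2 ∧ p.2 < label_cnt
    · rw [if_pos h, ih, PySem.List.pySetD_of_nonneg _ _ h.1, List.length_set]
      refine List.map_congr_left ?_
      intro k hk
      rw [List.mem_range] at hk
      by_cases hkm : k = p.2.toNat
      · have hpk : p.2 = (k : Int) := by omega
        have hcoll : pvColl name_list label_cnt (p :: E) (k : Int)
            = PySem.List.pyGetD name_list p.1 "" :: pvColl name_list label_cnt E (k : Int) := by
          have hkc : ((k : Nat) : Int) < label_cnt := hpk ▸ h.2
          simp [pvColl, hpk, hkc]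
        rw [hcoll]
        have hget : (bs.set p.2.toNat (PySem.List.pyGetD bs p.2 [] ++ [PySem.List.pyGetD name_list p.1 ""])).getD k []
            = PySem.List.pyGetD bs p.2 [] ++ [PySem.List.pyGetD name_list p.1 ""] := by
          subst hkm
          simp [List.getD_eq_getElem?_getD, hk]
        rw [hget]
        have hbs : PySem.List.pyGetD bs p.2 [] = bs.getD k [] := by
          rw [hpk]
          simp [PySem.List.pyGetD_natCast]
        rw [hbs, List.append_assoc]
        simp
      · have hne : p.2 ≠ (k : Int) := by omega
        have hcoll : pvColl name_list label_cnt (p :: E) (k : Int) = pvColl name_list label_cnt E (k : Int) := by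
          simp only [pvColl, if_neg (by tauto : ¬ (0 ≤ p.2 ∧ p.2 < label_cnt ∧ p.2 = (k : Int)))]
        rw [hcoll]
        have : (bs.set p.2.toNat (PySem.List.pyGetD bs p.2 [] ++ [PySem.List.pyGetD name_list p.1 ""])).getD k []
            = bs.getD k [] := by
          simp [List.getD_eq_getElem?_getD, Ne.symm hkm]
        rw [this]
    · rw [if_neg h, ih]
      refine List.map_congr_left ?_
      intro k hk
      have hcoll : pvColl name_list label_cnt (p :: E) (k : Int) = pvColl name_list label_cnt E (k : Int) := by
        simp only [pvColl, if_neg (by tauto : ¬ (0 ≤ p.2 ∧ p.2 < label_cnt ∧ p.2 = (k : Int)))]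
      rw [hcoll]

-- ===== VERDICT (by name: the statement is the Claim_ definition above) =====
theorem get_elements_list_by_label_spec : Claim_equal_get_elements_list_by_label := by
  intro label_list name_list label_cnt _hdom _hpre
  unfold Spec_get_elements_list_by_label get_elements_list_by_label get_elements_list_by_label_alt
  rw [PySem.List.foldl_append_singleton_eq_map, List.nil_append,
    pvFoldB name_list label_cnt (PySem.List.enumerate label_list 0)]
  refine List.ext_getElem (by simp [PySem.List.length_pyRange_one]) ?_
  intro k h1 h2
  have hk : k < label_cnt.toNat := by
    simpa [PySem.List.length_pyRange_one] using h1
  have hk0 : (0 : Int) ≤ (k : Int) := by omega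
  have hkc : (k : Int) < label_cnt := by omega
  have hgetD : ((PySem.List.pyRange 0 label_cnt 1).map (fun _ => ([] : List String))).getD k [] = [] := by
    rw [List.getD_eq_getElem?_getD, List.getElem?_map]
    cases (PySem.List.pyRange 0 label_cnt 1)[k]? <;> simp
  have hInner :
      List.foldl (fun one_label_list j =>
          if PySem.List.pyGetD label_list j 0 = ((k : Nat) : Int) then
            one_label_list ++ [PySem.List.pyGetD name_list j ""]
          else one_label_list) []
        (PySem.List.pyRange 0 (label_list.length : Int) 1)
      = pvColl name_list label_cnt (PySem.List.enumerate label_list 0) ((k : Nat) : Int) := by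
    have h2 := pvInnerA name_list label_cnt ((k : Nat) : Int) hk0 hkc
        ((PySem.List.pyRange 0 (PySem.List.len label_list) 1).map
          (fun j => (j, PySem.List.pyGetD label_list j 0))) []
    rw [List.foldl_map] at h2
    simp only [List.nil_append] at h2
    rw [PySem.List.enumerate_eq_map_pyRange label_list (0 : Int)]
    simpa [PySem.List.len] using h2
  simp only [List.getElem_map, PySem.List.getElem_pyRange_one, List.getElem_range, hgetD,
    List.nil_append, zero_add]
  exact hInner
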